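-- pv_equiv track=rewrite | github.com/antoine-palazz/Python-pour-la-Data-Science | Script/main_clement.py | reduce_genres_list
-- ===== SOURCE A (Python) =====
-- def reduce_genres_list(list_of_genres):
--     sorted_list = sorted(list_of_genres, key=lambda x: len(x))
--     visited_words = []
--     dict = {}
--     for genre in sorted_list:
--         dict[genre] = [genre]
--         c = 0
--         for word in visited_words:
--             if word in genre and word != genre:
--                 dict[genre] += [word]
--                 c += 1
--         if c > 0:
--             dict[genre].remove(genre)
--         visited_words += [genre]
--     return dict
-- ===== SOURCE B (Python) =====
-- def reduce_genres_list(list_of_genres):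
--     sorted_list = sorted(list_of_genres, key=len)
--     result = {}
--     for genre in sorted_list:
--         subs = [w for w in sorted_list if w != genre and w in genre]
--         result[genre] = subs if subs else [genre]
--     return result
-- ===== Notes on version B (the rewrite author's own statement) =====
-- stated objective: simpler
-- what changed: Drops A's incrementally grown visited_words list, its match counter c and the list.remove(genre) self-removal hack: each genre's substring list is computed directly as one filter of the length-sorted list (correct because a proper substring is strictly shorter, hence earlier in that list), with the genre itself kept only when the filter is empty.
import Mathlib
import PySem

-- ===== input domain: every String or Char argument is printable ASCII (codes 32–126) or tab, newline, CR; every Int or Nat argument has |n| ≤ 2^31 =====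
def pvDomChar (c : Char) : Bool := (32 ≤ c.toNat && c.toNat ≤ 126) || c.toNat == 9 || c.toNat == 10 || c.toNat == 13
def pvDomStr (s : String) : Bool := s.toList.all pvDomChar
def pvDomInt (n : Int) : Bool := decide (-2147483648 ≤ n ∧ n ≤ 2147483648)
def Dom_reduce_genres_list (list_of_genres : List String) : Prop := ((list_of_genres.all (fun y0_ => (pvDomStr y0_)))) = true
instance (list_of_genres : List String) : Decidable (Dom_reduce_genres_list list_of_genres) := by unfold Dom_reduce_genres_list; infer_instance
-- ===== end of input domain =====

-- B replaces A's grown visited_words prefix, counter and .remove(genre) hack by one direct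
-- filter of the length-sorted list per genre (objective: simpler).

-- ===== PORT A =====
def reduce_genres_list (list_of_genres : List String) : List (String × List String) :=
  let sorted_list := PySem.List.sorted list_of_genres (fun x => PySem.Str.len x) false
  let res := sorted_list.foldl
    (fun (st : PySem.Dict String (List String) × List String) genre =>
      let d := st.1.insert genre [genre]
      let inner := st.2.foldl
        (fun (q : PySem.Dict String (List String) × Int) word =>
          if PySem.Str.isIn word genre && word != genre then
            (q.1.insert genre (q.1.getD genre [] ++ [word]), q.2 + 1)
          else q)
        (d, (0 : Int))
      let d2 := if inner.2 > 0 then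
          -- list.remove(genre): genre always heads the entry, so remove? is never none; the [] fallback is unreachable
          inner.1.insert genre ((PySem.List.remove? (inner.1.getD genre []) genre).getD [])
        else inner.1
      (d2, st.2 ++ [genre]))
    (PySem.Dict.empty, ([] : List String))
  res.1.items

-- ===== PORT B =====
def reduce_genres_list_alt (list_of_genres : List String) : List (String × List String) :=
  let sorted_list := PySem.List.sorted list_of_genres (fun x => PySem.Str.len x) false
  let res := sorted_list.foldl
    (fun (d : PySem.Dict String (List String)) genre =>
      let subs := sorted_list.filter (fun w => w != genre && PySem.Str.isIn w genre)
      d.insert genre (if subs.isEmpty then [genre] else subs))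
    PySem.Dict.empty
  res.items

-- ===== PRECONDITION & SPEC =====
def Spec_reduce_genres_list (list_of_genres : List String) (out : List (String × List String)) : Prop := out = reduce_genres_list_alt list_of_genres
instance (list_of_genres : List String) (out : List (String × List String)) : Decidable (Spec_reduce_genres_list list_of_genres out) := by unfold Spec_reduce_genres_list; infer_instance

-- ===== CLAIM (what is proved, stated in full; the proofs are below) =====
def Claim_equal_reduce_genres_list : Prop := ∀ (list_of_genres : List String), Dom_reduce_genres_list list_of_genres → Spec_reduce_genres_list list_of_genres (reduce_genres_list list_of_genres)

-- ===== LEMMAS AND PROOFS =====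

-- A's inner-loop predicate (B's comprehension tests the same two conjuncts in the other order).
def pvSub (genre w : String) : Bool := PySem.Str.isIn w genre && w != genre

-- a proper substring is strictly shorter
lemma pvSub_len_lt (genre w : String) (h : pvSub genre w = true) :
    PySem.Str.len w < PySem.Str.len genre := by
  unfold pvSub at h
  simp only [Bool.and_eq_true, bne_iff_ne] at h
  obtain ⟨hin, hne⟩ := h
  have hinf : w.toList <:+: genre.toList := (PySem.Str.isIn_iff_infix w genre).mp hin
  have hle : w.toList.length ≤ genre.toList.length := hinf.length_le
  rcases lt_or_eq_of_le hle with hlt | heq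
  · simpa [PySem.Str.len] using hlt
  · exact absurd (String.toList_inj.mp (hinf.eq_of_length heq)) hne

-- A's inner loop over visited words appends exactly the matching words to the dict entry and counts them
lemma pv_inner_fold (genre : String) (vs : List String) :
    ∀ (d : PySem.Dict String (List String)) (cur : List String) (c : Int),
    vs.foldl
      (fun (q : PySem.Dict String (List String) × Int) word =>
        if PySem.Str.isIn word genre && word != genre then
          (q.1.insert genre (q.1.getD genre [] ++ [word]), q.2 + 1)
        else q)
      (d.insert genre cur, c)
    = (d.insert genre (cur ++ vs.filter (pvSub genre)), c + (vs.countP (pvSub genre) : Int)) := by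
  induction vs with
  | nil => intro d cur c; simp
  | cons w rest ih =>
    intro d cur c
    by_cases hw : pvSub genre w = true
    · have hw' : (PySem.Str.isIn w genre && w != genre) = true := hw
      have h1 : (w :: rest).filter (pvSub genre) = w :: rest.filter (pvSub genre) := by
        simp [hw]
      have h2 : (w :: rest).countP (pvSub genre) = rest.countP (pvSub genre) + 1 := by
        simp [hw]
      simp only [List.foldl_cons, hw', if_true, PySem.Dict.getD_insert_self,
        PySem.Dict.insert_insert_self]
      rw [ih d (cur ++ [w]) (c + 1), h1, h2]
      refine Prod.ext ?_ ?_
      · simp [List.append_assoc]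
      · push_cast; ring
    · simp only [Bool.not_eq_true] at hw
      have hw' : (PySem.Str.isIn w genre && w != genre) = false := hw
      have h1 : (w :: rest).filter (pvSub genre) = rest.filter (pvSub genre) := by
        simp [hw]
      have h2 : (w :: rest).countP (pvSub genre) = rest.countP (pvSub genre) := by
        simp [hw]
      simp only [List.foldl_cons, hw', Bool.false_eq_true, if_false]
      rw [ih d cur c, h1, h2]

-- no genre at or after its own position in the length-sorted list is a proper substring of it
lemma pv_filter_tail_nil (genre : String) (suf : List String)
    (h : ∀ w ∈ suf, PySem.Str.len genre ≤ PySem.Str.len w) :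
    (genre :: suf).filter (pvSub genre) = [] := by
  rw [List.filter_eq_nil_iff]
  intro w hw
  rcases List.mem_cons.mp hw with rfl | hmem
  · simp [pvSub]
  · intro hP
    exact absurd (pvSub_len_lt genre w hP) (not_lt.mpr (h w hmem))

-- main invariant: with visited = the processed prefix, A's fold state dict equals B's
lemma pv_main (S : List String)
    (hpw : S.Pairwise (fun a b => PySem.Str.len a ≤ PySem.Str.len b)) :
    ∀ (suf pre : List String) (d : PySem.Dict String (List String)), pre ++ suf = S →
    (suf.foldl
      (fun (st : PySem.Dict String (List String) × List String) genre =>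
        let dd := st.1.insert genre [genre]
        let inner := st.2.foldl
          (fun (q : PySem.Dict String (List String) × Int) word =>
            if PySem.Str.isIn word genre && word != genre then
              (q.1.insert genre (q.1.getD genre [] ++ [word]), q.2 + 1)
            else q)
          (dd, (0 : Int))
        let d2 := if inner.2 > 0 then
            inner.1.insert genre ((PySem.List.remove? (inner.1.getD genre []) genre).getD [])
          else inner.1
        (d2, st.2 ++ [genre]))
      (d, pre)).1
    = suf.foldl
      (fun (d : PySem.Dict String (List String)) genre =>
        let subs := S.filter (fun w => w != genre && PySem.Str.isIn w genre)
        d.insert genre (if subs.isEmpty then [genre] else subs))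
      d := by
  intro suf
  induction suf with
  | nil => intro pre d _; rfl
  | cons genre rest ih =>
    intro pre d hS
    have hfilter_eq : S.filter (fun w => w != genre && PySem.Str.isIn w genre)
        = pre.filter (pvSub genre) := by
      have htail : ∀ w ∈ rest, PySem.Str.len genre ≤ PySem.Str.len w := by
        have hsub : (genre :: rest).Sublist S := by
          rw [← hS]; exact (List.suffix_append pre (genre :: rest)).sublist
        have := (List.pairwise_cons.mp (hpw.sublist hsub)).1
        exact this
      have hcongr : S.filter (fun w => w != genre && PySem.Str.isIn w genre)
          = S.filter (pvSub genre) := by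
        apply List.filter_congr
        intro w _
        simp [pvSub, Bool.and_comm]
      rw [hcongr, ← hS, List.filter_append, pv_filter_tail_nil genre rest htail,
        List.append_nil]
    simp only [List.foldl_cons]
    rw [pv_inner_fold genre pre d [genre] 0]
    have hstep :
        (if (0 : Int) + (pre.countP (pvSub genre) : Int) > 0 then
            (d.insert genre ([genre] ++ pre.filter (pvSub genre))).insert genre
              ((PySem.List.remove?
                ((d.insert genre ([genre] ++ pre.filter (pvSub genre))).getD genre [])
                genre).getD [])
          else d.insert genre ([genre] ++ pre.filter (pvSub genre)))
        = d.insert genre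
            (if (pre.filter (pvSub genre)).isEmpty then [genre] else pre.filter (pvSub genre)) := by
      by_cases hemp : (pre.filter (pvSub genre)).isEmpty = true
      · have hnil : pre.filter (pvSub genre) = [] := List.isEmpty_iff.mp hemp
        have h0 : pre.countP (pvSub genre) = 0 := by
          rw [List.countP_eq_length_filter, hnil]; rfl
        simp [h0, hnil]
      · have hpos : 0 < pre.countP (pvSub genre) := by
          rw [List.countP_eq_length_filter]
          simp only [List.isEmpty_iff] at hemp
          exact List.length_pos_iff.mpr hemp
        have hcond : (0 : Int) + (pre.countP (pvSub genre) : Int) > 0 := by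
          omega
        rw [if_pos hcond, PySem.Dict.getD_insert_self]
        have : [genre] ++ pre.filter (pvSub genre) = genre :: pre.filter (pvSub genre) := rfl
        rw [this, PySem.List.remove?_cons_self, Option.getD_some,
          PySem.Dict.insert_insert_self]
        simp [hemp]
    simp only [gt_iff_lt] at hstep ⊢
    rw [hstep, ← hfilter_eq]
    exact ih (pre ++ [genre]) _ (by rw [← hS]; simp)

-- ===== VERDICT (by name: the statement is the Claim_ definition above) =====
theorem reduce_genres_list_spec : Claim_equal_reduce_genres_list := by
  intro l _
  unfold Spec_reduce_genres_list reduce_genres_list reduce_genres_list_alt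
  dsimp only
  have hpw := PySem.List.sorted_pairwise l (fun x => PySem.Str.len x)
  rw [pv_main (PySem.List.sorted l (fun x => PySem.Str.len x) false) hpw
    (PySem.List.sorted l (fun x => PySem.Str.len x) false) [] PySem.Dict.empty rfl]
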